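-- pv_equiv track=rewrite | github.com/alexandraback/datacollection | solutions_2692487_1/Python/Servy/TaskA.py | calcPromotes
-- ===== SOURCE A (Python) =====
-- def calcPromotes(a, b):
--     res = 0
--
--     if a - 1 == 0:
--         return (a, 10000)
--
--     while (a <= b):
--         a += a-1
--         res += 1
--     return (a, res)
-- ===== SOURCE B (Python) =====
-- def calcPromotes(a, b):
--     d = a - 1
--     if d == 0:
--         return (a, 10000)
--     if a > b:
--         return (a, 0)
--     res = ((b - 1) // d).bit_length()
--     return (1 + d * (1 << res), res)
-- ===== Notes on version B (the rewrite author's own statement) =====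
-- stated objective: faster
-- what changed: Replaces the doubling while-loop with a closed-form computation: res = bit_length((b-1)//(a-1)) and final value 1 + (a-1)*2**res.
import Mathlib
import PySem

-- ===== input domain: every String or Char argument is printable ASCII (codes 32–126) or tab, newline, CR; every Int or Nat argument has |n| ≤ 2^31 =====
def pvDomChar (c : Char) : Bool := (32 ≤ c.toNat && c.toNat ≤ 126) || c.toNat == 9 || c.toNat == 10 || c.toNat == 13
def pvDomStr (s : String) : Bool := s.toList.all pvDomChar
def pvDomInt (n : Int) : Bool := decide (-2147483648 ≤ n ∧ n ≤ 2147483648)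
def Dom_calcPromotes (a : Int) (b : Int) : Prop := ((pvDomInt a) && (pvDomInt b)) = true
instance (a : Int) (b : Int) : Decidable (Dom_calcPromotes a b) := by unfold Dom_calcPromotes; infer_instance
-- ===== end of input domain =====

-- B replaces A's doubling loop by a closed-form bit_length computation of the count and the final value.

-- ===== PORT A =====
-- A's while loop; the extra `2 ≤ a` in the guard only makes the recursion well-founded:
-- on Pre_ (0 < a ∨ b < a) a reachable `a ≤ b` state always has 2 ≤ a, so the guard equals Python's `a ≤ b`
-- (for a ≤ 0 ∧ a ≤ b the Python loop never terminates; those inputs are outside Pre_).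
def calcLoop (a : Int) (b : Int) (res : Int) : Int × Int :=
  if h : a ≤ b ∧ 2 ≤ a then calcLoop (a + (a - 1)) b (res + 1) else (a, res)
termination_by (b + 1 - a).toNat
decreasing_by obtain ⟨h1, h2⟩ := h; omega

def calcPromotes (a : Int) (b : Int) : Int × Int :=
  if a - 1 = 0 then (a, 10000) else calcLoop a b 0

-- ===== PORT B =====
def calcPromotes_alt (a : Int) (b : Int) : Int × Int :=
  let d := a - 1
  if d = 0 then (a, 10000)
  else if b < a then (a, 0)
  else
    let res := PySem.Int.bitLength (PySem.Int.floordiv (b - 1) d)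
    (1 + d * ((1 : Int) <<< res), (res : Int))

-- ===== PRECONDITION & SPEC =====
-- Pre_ excludes exactly a ≤ 0 ∧ a ≤ b, where A's while loop never terminates (a decreases forever).
def Pre_calcPromotes (a : Int) (b : Int) : Prop := 0 < a ∨ b < a
instance (a : Int) (b : Int) : Decidable (Pre_calcPromotes a b) := by unfold Pre_calcPromotes; infer_instance
def pvWitness_calcPromotes : Int × Int := (2, 100)

def Spec_calcPromotes (a : Int) (b : Int) (out : Int × Int) : Prop := out = calcPromotes_alt a b
instance (a : Int) (b : Int) (out : Int × Int) : Decidable (Spec_calcPromotes a b out) := by unfold Spec_calcPromotes; infer_instance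

-- ===== CLAIM (what is proved, stated in full; the proofs are below) =====
def Claim_equal_calcPromotes : Prop := ∀ (a : Int) (b : Int), Dom_calcPromotes a b → Pre_calcPromotes a b → Spec_calcPromotes a b (calcPromotes a b)

-- ===== LEMMAS AND PROOFS =====

theorem one_shiftLeft_int (n : Nat) : ((1 : Int) <<< n) = 2 ^ n := by
  simp [Int.shiftLeft_eq]

-- main loop characterisation: from any state with 2 ≤ a ≤ b the loop returns the closed form
theorem calcLoop_eq (n : Nat) (a b res : Int) (ha : 2 ≤ a) (hab : a ≤ b)
    (hn : (b + 1 - a).toNat = n) :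
    calcLoop a b res =
      (1 + (a - 1) * 2 ^ PySem.Int.bitLength (PySem.Int.floordiv (b - 1) (a - 1)),
       res + (PySem.Int.bitLength (PySem.Int.floordiv (b - 1) (a - 1)) : Int)) := by
  induction n using Nat.strong_induction_on generalizing a res with
  | _ n ih =>
  have hd : (1 : Int) ≤ a - 1 := by omega
  set d : Int := a - 1 with hdef
  have hq1 : (1 : Int) ≤ PySem.Int.floordiv (b - 1) d := by
    rw [PySem.Int.le_floordiv_iff_mul_le (by omega)]; omega
  have hqpos : (0 : Int) < PySem.Int.floordiv (b - 1) d := by omega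
  rw [calcLoop, dif_pos ⟨hab, ha⟩]
  by_cases hstep : a + (a - 1) ≤ b
  · -- one more iteration will follow; apply the induction hypothesis at a' = 2a - 1
    have hrec := ih (b + 1 - (a + (a - 1))).toNat (by omega) (a + (a - 1)) (res + 1)
        (by omega) hstep rfl
    rw [hrec]
    have hdd : a + (a - 1) - 1 = d * 2 := by omega
    have hcomp : PySem.Int.floordiv (b - 1) (d * 2)
        = PySem.Int.floordiv (PySem.Int.floordiv (b - 1) d) 2 := by
      rw [PySem.Int.floordiv_eq_ediv_of_pos (by omega),
          PySem.Int.floordiv_eq_ediv_of_pos (by omega),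
          PySem.Int.floordiv_eq_ediv_of_pos (by omega),
          Int.ediv_ediv_of_nonneg (by omega)]
    have hbit : PySem.Int.bitLength (PySem.Int.floordiv (b - 1) d)
        = PySem.Int.bitLength (PySem.Int.floordiv (b - 1) (d * 2)) + 1 := by
      rw [hcomp, PySem.Int.bitLength_of_pos hqpos]
    rw [hdd, hbit]
    simp only [Prod.mk.injEq, pow_succ]
    constructor
    · ring
    · push_cast; ring
  · -- the loop stops after this iteration: q = 1, count = 1
    have hq2 : PySem.Int.floordiv (b - 1) d < 2 := by
      rw [PySem.Int.floordiv_lt_iff_lt_mul (by omega)]; omega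
    have hq : PySem.Int.floordiv (b - 1) d = 1 := by omega
    rw [calcLoop, dif_neg (by omega), hq]
    have h1 : PySem.Int.bitLength 1 = 1 := by decide
    rw [h1]
    simp only [Prod.mk.injEq, pow_one]
    constructor <;> push_cast <;> omega

theorem calcPromotes_spec : Claim_equal_calcPromotes := by
  intro a b _hdom hpre
  unfold Spec_calcPromotes calcPromotes calcPromotes_alt
  by_cases hd : a - 1 = 0
  · simp [hd]
  · simp only [hd, if_false]
    by_cases hab : b < a
    · rw [calcLoop, dif_neg (by omega)]
      simp [hab]
    · have ha : 2 ≤ a := by rcases hpre with h | h <;> omega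
      simp only [show ¬ b < a from hab, if_false]
      rw [calcLoop_eq (b + 1 - a).toNat a b 0 ha (by omega) rfl, one_shiftLeft_int]
      simp
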